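-- pv_equiv track=rewrite | github.com/antoniooazevedo/burger-time | untitled1.py | find_treasure
-- ===== SOURCE A (Python) =====
-- def find_treasure(pos, steps):
--     if len(steps) == 0:
--         return pos
--     else:
--         if steps[0] == "up":
--             l = list(pos)
--             l[1] += 1
--             pos = tuple(l)
--             return find_treasure(pos, steps[1:])
--         if steps[0] == "down":
--             l = list(pos)
--             l[1] -= 1
--             pos = tuple(l)
--             return find_treasure(pos, steps[1:])
--         if steps[0] == "right":
--             l = list(pos)
--             l[0] += 1
--             pos = tuple(l)
--             return find_treasure(pos, steps[1:])
--         if steps[0] == "left":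
--             l = list(pos)
--             l[0] -= 1
--             pos = tuple(l)
--             return find_treasure(pos, steps[1:])
--
--     return pos
-- ===== SOURCE B (Python) =====
-- DELTA = {"up": (0, 1), "down": (0, -1), "right": (1, 0), "left": (-1, 0)}
--
-- def find_treasure(pos, steps):
--     dx = dy = 0
--     n = 0
--     for s in steps:
--         if s not in DELTA:
--             break
--         ddx, ddy = DELTA[s]
--         dx += ddx
--         dy += ddy
--         n += 1
--     if n == 0:
--         return pos
--     l = list(pos)
--     l[0] += dx
--     l[1] += dy
--     return tuple(l)
-- ===== Notes on version B (the rewrite author's own statement) =====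
-- stated objective: alternative
-- what changed: Replaces the recursion that slices steps[1:] and rebuilds the whole position tuple at every step with a single table-driven loop that sums the x/y deltas up to the first unrecognized step and applies the two offsets once.
-- outside the precondition, e.g. on find_treasure((5,), ['left']): A returns (4,), B raises IndexError; on find_treasure((), ['up']): A raises IndexError, B raises IndexError
import Mathlib
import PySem

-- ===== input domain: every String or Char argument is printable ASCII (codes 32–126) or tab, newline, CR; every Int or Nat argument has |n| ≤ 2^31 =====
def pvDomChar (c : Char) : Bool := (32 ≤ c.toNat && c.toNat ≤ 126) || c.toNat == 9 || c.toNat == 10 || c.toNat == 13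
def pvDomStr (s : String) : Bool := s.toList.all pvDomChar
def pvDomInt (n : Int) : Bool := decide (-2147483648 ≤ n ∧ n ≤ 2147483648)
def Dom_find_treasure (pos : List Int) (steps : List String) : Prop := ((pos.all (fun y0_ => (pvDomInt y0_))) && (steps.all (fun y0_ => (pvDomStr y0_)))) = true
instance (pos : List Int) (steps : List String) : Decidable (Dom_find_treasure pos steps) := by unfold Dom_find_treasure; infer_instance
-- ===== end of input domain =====

-- B replaces A's recursive tuple-rebuilding walk with one table-driven pass summing x/y deltas, applied to the position once at the end (alternative algorithm, no speed claim).
-- Pre_ excludes positions with fewer than 2 coordinates when the first step is directional: there A raises IndexError on up/down (and on left/right after any later up/down), while on a left/right-only prefix A returns but B's single delta application raises IndexError itself.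


-- ===== PORT A =====
-- l = list(pos); l[1] += d; pos = tuple(l)  — exact when pos has ≥ 2 elements (Python raises IndexError otherwise; excluded by Pre_)
def pvBumpY (pos : List Int) (d : Int) : List Int :=
  match pos with
  | a :: b :: rest => a :: (b + d) :: rest
  | _ => pos
-- l = list(pos); l[0] += d; pos = tuple(l)  — exact when pos has ≥ 1 element (Python raises IndexError otherwise; excluded by Pre_)
def pvBumpX (pos : List Int) (d : Int) : List Int :=
  match pos with
  | a :: rest => (a + d) :: rest
  | _ => pos

def find_treasure (pos : List Int) (steps : List String) : List Int :=
  match steps with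
  | [] => pos
  | s :: rest =>
    if s = "up" then find_treasure (pvBumpY pos 1) rest
    else if s = "down" then find_treasure (pvBumpY pos (-1)) rest
    else if s = "right" then find_treasure (pvBumpX pos 1) rest
    else if s = "left" then find_treasure (pvBumpX pos (-1)) rest
    else pos

-- ===== PORT B =====
-- DELTA = {"up": (0,1), "down": (0,-1), "right": (1,0), "left": (-1,0)} as an association list
def pvDELTA : List (String × (Int × Int)) :=
  [("up", (0, 1)), ("down", (0, -1)), ("right", (1, 0)), ("left", (-1, 0))]

-- the for-loop of B: accumulate (dx, dy, n), stopping at the first step not in DELTA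
def pvScan (steps : List String) (dx dy : Int) (n : Nat) : Int × Int × Nat :=
  match steps with
  | [] => (dx, dy, n)
  | s :: rest =>
    match pvDELTA.lookup s with
    | none => (dx, dy, n)
    | some (ddx, ddy) => pvScan rest (dx + ddx) (dy + ddy) (n + 1)

-- l = list(pos); l[0] += dx; l[1] += dy  — exact when pos has ≥ 2 elements (Python raises IndexError otherwise; excluded by Pre_)
def pvApply (pos : List Int) (dx dy : Int) : List Int :=
  match pos with
  | a :: b :: rest => (a + dx) :: (b + dy) :: rest
  | _ => pos

def find_treasure_alt (pos : List Int) (steps : List String) : List Int :=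
  let r := pvScan steps 0 0 0
  if r.2.2 = 0 then pos else pvApply pos r.1 r.2.1

-- ===== PRECONDITION & SPEC =====
-- Excluded: positions shorter than 2 whose first step is directional — A raises IndexError there except when only left/right
-- steps occur before the stop (then A returns but B's natural delta application raises IndexError).
def Pre_find_treasure (pos : List Int) (steps : List String) : Prop :=
  2 ≤ pos.length ∨ (∀ s ∈ steps.take 1, s ∉ (["up", "down", "right", "left"] : List String))
instance (pos : List Int) (steps : List String) : Decidable (Pre_find_treasure pos steps) := by unfold Pre_find_treasure; infer_instance
def pvWitness_find_treasure : List Int × List String := ([3, 4], ["up", "left", "stop", "down"])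

def Spec_find_treasure (pos : List Int) (steps : List String) (out : List Int) : Prop := out = find_treasure_alt pos steps
instance (pos : List Int) (steps : List String) (out : List Int) : Decidable (Spec_find_treasure pos steps out) := by unfold Spec_find_treasure; infer_instance

-- ===== CLAIM (what is proved, stated in full; the proofs are below) =====
def Claim_equal_find_treasure : Prop := ∀ (pos : List Int) (steps : List String), Dom_find_treasure pos steps → Pre_find_treasure pos steps → Spec_find_treasure pos steps (find_treasure pos steps)

-- ===== LEMMAS AND PROOFS =====

-- an unrecognized step is absent from DELTA
lemma pvLookup_none {s : String} (h1 : s ≠ "up") (h2 : s ≠ "down") (h3 : s ≠ "right") (h4 : s ≠ "left") :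
    pvDELTA.lookup s = none := by
  simp only [pvDELTA, List.lookup, beq_eq_false_iff_ne.2 h1, beq_eq_false_iff_ne.2 h2,
    beq_eq_false_iff_ne.2 h3, beq_eq_false_iff_ne.2 h4]

-- shifting pvScan's accumulators out
lemma pvScan_shift (steps : List String) (dx dy : Int) (n : Nat) :
    pvScan steps dx dy n =
      (dx + (pvScan steps 0 0 0).1, dy + (pvScan steps 0 0 0).2.1, n + (pvScan steps 0 0 0).2.2) := by
  induction steps generalizing dx dy n with
  | nil => simp [pvScan]
  | cons s rest ih =>
    simp only [pvScan]
    match h : pvDELTA.lookup s with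
    | none => simp
    | some (ddx, ddy) =>
      dsimp only
      rw [ih (dx + ddx), ih (0 + ddx)]
      simp; constructor
      · ring
      constructor
      · ring
      · omega

-- A on a position of length ≥ 2 equals the summed deltas applied once
lemma find_treasure_delta (steps : List String) (a b : Int) (rest : List Int) :
    find_treasure (a :: b :: rest) steps =
      (a + (pvScan steps 0 0 0).1) :: (b + (pvScan steps 0 0 0).2.1) :: rest := by
  induction steps generalizing a b with
  | nil => simp [find_treasure, pvScan]
  | cons s tl ih =>
    by_cases hu : s = "up"
    · subst hu
      rw [show find_treasure (a :: b :: rest) ("up" :: tl) = find_treasure (a :: (b + 1) :: rest) tl from rfl, ih]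
      rw [show pvScan ("up" :: tl) 0 0 0 = pvScan tl 0 1 1 from rfl, pvScan_shift tl 0 1 1]
      simp only [List.cons.injEq]
      exact ⟨by ring, by ring, trivial⟩
    by_cases hd : s = "down"
    · subst hd
      rw [show find_treasure (a :: b :: rest) ("down" :: tl) = find_treasure (a :: (b + -1) :: rest) tl from rfl, ih]
      rw [show pvScan ("down" :: tl) 0 0 0 = pvScan tl 0 (-1) 1 from rfl, pvScan_shift tl 0 (-1) 1]
      simp only [List.cons.injEq]
      exact ⟨by ring, by ring, trivial⟩
    by_cases hr : s = "right"
    · subst hr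
      rw [show find_treasure (a :: b :: rest) ("right" :: tl) = find_treasure ((a + 1) :: b :: rest) tl from rfl, ih]
      rw [show pvScan ("right" :: tl) 0 0 0 = pvScan tl 1 0 1 from rfl, pvScan_shift tl 1 0 1]
      simp only [List.cons.injEq]
      exact ⟨by ring, by ring, trivial⟩
    by_cases hl : s = "left"
    · subst hl
      rw [show find_treasure (a :: b :: rest) ("left" :: tl) = find_treasure ((a + -1) :: b :: rest) tl from rfl, ih]
      rw [show pvScan ("left" :: tl) 0 0 0 = pvScan tl (-1) 0 1 from rfl, pvScan_shift tl (-1) 0 1]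
      simp only [List.cons.injEq]
      exact ⟨by ring, by ring, trivial⟩
    · have hlook : pvDELTA.lookup s = none := pvLookup_none hu hd hr hl
      simp [find_treasure, hu, hd, hr, hl, pvScan, hlook]

-- ===== VERDICT (by name: the statement is the Claim_ definition above) =====
theorem find_treasure_spec : Claim_equal_find_treasure := by
  intro pos steps _ hpre
  unfold Spec_find_treasure find_treasure_alt
  rcases hpre with hlen | hhd
  · match pos, hlen with
    | a :: b :: rest, _ =>
      rw [find_treasure_delta]
      by_cases hn : (pvScan steps 0 0 0).2.2 = 0
      · -- n = 0 forces the first step to be unrecognized, so both sides are pos… but here we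
        -- only need the values: with n = 0 the scan never consumed a step, so dx = dy = 0
        match steps with
        | [] => simp [pvScan]
        | s :: tl =>
          rw [pvScan] at hn ⊢
          match h : pvDELTA.lookup s with
          | none => simp [h, pvScan] at hn ⊢
          | some (ddx, ddy) =>
            exfalso
            rw [h] at hn
            dsimp only at hn
            rw [pvScan_shift] at hn
            simp at hn
      · simp [if_neg hn, pvApply]
  · match steps with
    | [] => simp [find_treasure, pvScan]
    | s :: tl =>
      have hs := hhd s (by simp)
      simp only [List.mem_cons, List.mem_singleton, not_or] at hs
      obtain ⟨h1, h2, h3, h4, -⟩ := hs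
      have hlook : pvDELTA.lookup s = none := pvLookup_none h1 h2 h3 h4
      simp [find_treasure, h1, h2, h3, h4, pvScan, hlook]
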